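-- pv_equiv track=rewrite | github.com/Lulusek/fili-extractor | fili_links.py | get_audio_names_sorted
-- ===== SOURCE A (Python) =====
-- def get_audio_names_sorted(audio_names, best):
-- 	try:
-- 		best_audio_index = audio_names.index(best)
-- 	except ValueError: #best_audio is not in the list
-- 		best_audio_index = audio_names.index('LEKTOR_PL')
--
-- 	audio_names_sorted = []
-- 	count = best_audio_index
-- 	a = best_audio_index
-- 	for i in range(len(audio_names)):
-- 		audio_names_sorted.append(audio_names[best_audio_index])
-- 		if count == 0:
-- 			best_audio_index = a+1
-- 		elif count < 0:
-- 			best_audio_index += 1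
-- 		else:
-- 			best_audio_index -= 1
-- 		count -= 1
--
-- 	return audio_names_sorted
-- ===== SOURCE B (Python) =====
-- def get_audio_names_sorted(audio_names, best):
-- 	try:
-- 		i = audio_names.index(best)
-- 	except ValueError: #best_audio is not in the list
-- 		i = audio_names.index('LEKTOR_PL')
-- 	return list(reversed(audio_names[:i+1])) + audio_names[i+1:]
-- ===== Notes on version B (the rewrite author's own statement) =====
-- stated objective: simpler
-- what changed: Replaces the element-by-element count/sign index walk with two slices: the reversed prefix up to the resolved index followed by the untouched suffix.
import Mathlib
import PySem

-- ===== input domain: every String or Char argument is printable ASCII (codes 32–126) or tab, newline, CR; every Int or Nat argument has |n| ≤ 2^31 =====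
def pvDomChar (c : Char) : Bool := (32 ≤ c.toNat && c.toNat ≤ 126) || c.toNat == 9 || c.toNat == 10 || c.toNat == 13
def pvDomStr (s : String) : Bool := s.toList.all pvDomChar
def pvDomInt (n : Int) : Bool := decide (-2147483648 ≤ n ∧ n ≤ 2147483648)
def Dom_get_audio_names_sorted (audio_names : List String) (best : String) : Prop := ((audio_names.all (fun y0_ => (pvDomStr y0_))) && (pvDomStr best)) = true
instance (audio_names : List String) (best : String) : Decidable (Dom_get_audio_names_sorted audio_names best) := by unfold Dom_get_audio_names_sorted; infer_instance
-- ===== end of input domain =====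

-- B replaces A's element-by-element count/sign index walk with slicing: reversed prefix + suffix (same cost, simpler).


-- ===== PORT A =====
-- one loop iteration: append audio_names[best_audio_index], then update the index by count's sign
def pvStepA (audio_names : List String) (a : Int) (st : List String × Int × Int) (_ : Nat) : List String × Int × Int :=
  let acc := st.1 ++ [PySem.List.pyGetD audio_names st.2.2 ""]
  let bi := if st.2.1 = 0 then a + 1 else if st.2.1 < 0 then st.2.2 + 1 else st.2.2 - 1
  (acc, st.2.1 - 1, bi)

def pvLoopA (audio_names : List String) (best_audio_index : Nat) : List String :=
  ((List.range audio_names.length).foldl (pvStepA audio_names best_audio_index)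
    ([], (best_audio_index : Int), (best_audio_index : Int))).1

def get_audio_names_sorted (audio_names : List String) (best : String) : List String :=
  match PySem.List.index? audio_names best with
  | some i => pvLoopA audio_names i
  | none =>
    match PySem.List.index? audio_names "LEKTOR_PL" with
    | some i => pvLoopA audio_names i
    | none => []   -- ValueError in Python; excluded by Pre_

-- ===== PORT B =====
def pvMkB (audio_names : List String) (i : Nat) : List String :=
  (PySem.List.slice audio_names none (some ((i : Int) + 1))).reverse
    ++ PySem.List.slice audio_names (some ((i : Int) + 1)) none

def get_audio_names_sorted_alt (audio_names : List String) (best : String) : List String :=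
  match PySem.List.index? audio_names best with
  | some i => pvMkB audio_names i
  | none =>
    match PySem.List.index? audio_names "LEKTOR_PL" with
    | some i => pvMkB audio_names i
    | none => []   -- ValueError in Python; excluded by Pre_

-- ===== PRECONDITION & SPEC =====
-- Pre_ excludes exactly the inputs where both lookups fail and Python A (and B) raise ValueError.
def Pre_get_audio_names_sorted (audio_names : List String) (best : String) : Prop :=
  best ∈ audio_names ∨ "LEKTOR_PL" ∈ audio_names
instance (audio_names : List String) (best : String) : Decidable (Pre_get_audio_names_sorted audio_names best) := by unfold Pre_get_audio_names_sorted; infer_instance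

def pvWitness_get_audio_names_sorted : List String × String := (["a", "b", "c"], "b")

def Spec_get_audio_names_sorted (audio_names : List String) (best : String) (out : List String) : Prop := out = get_audio_names_sorted_alt audio_names best
instance (audio_names : List String) (best : String) (out : List String) : Decidable (Spec_get_audio_names_sorted audio_names best out) := by unfold Spec_get_audio_names_sorted; infer_instance

-- ===== CLAIM (what is proved, stated in full; the proofs are below) =====
def Claim_equal_get_audio_names_sorted : Prop := ∀ (audio_names : List String) (best : String), Dom_get_audio_names_sorted audio_names best → Pre_get_audio_names_sorted audio_names best → Spec_get_audio_names_sorted audio_names best (get_audio_names_sorted audio_names best)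

-- ===== LEMMAS AND PROOFS =====

-- the element A's loop emits at iteration j
def pvEmit (audio_names : List String) (i j : Nat) : String :=
  audio_names.getD (if j ≤ i then i - j else j) ""

lemma pvLoop_inv (xs : List String) (i : Nat) :
    ∀ k, (List.range k).foldl (pvStepA xs i) ([], (i : Int), (i : Int))
      = ((List.range k).map (pvEmit xs i), (i : Int) - k,
          if k ≤ i then (i : Int) - k else (k : Int)) := by
  intro k
  induction k with
  | zero => simp
  | succ k ih =>
    rw [List.range_succ, List.foldl_append, ih]
    simp only [List.foldl_cons, List.foldl_nil, pvStepA, List.map_append, List.map_cons,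
      List.map_nil]
    simp only [Prod.mk.injEq]
    refine ⟨?_, ?_, ?_⟩
    · -- the appended element
      congr 1
      by_cases hk : k ≤ i
      · simp only [hk, if_pos]
        have : (i : Int) - k = ((i - k : Nat) : Int) := by omega
        rw [this, PySem.List.pyGetD_natCast]
        simp [pvEmit, hk]
      · simp only [hk, if_neg, not_false_iff]
        rw [PySem.List.pyGetD_natCast]
        simp [pvEmit, hk]
    · push_cast; ring
    · split_ifs <;> omega

lemma pvLoop_eq_mk (xs : List String) (i : Nat) (hi : i < xs.length) :
    pvLoopA xs i = pvMkB xs i := by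
  unfold pvLoopA pvMkB
  rw [pvLoop_inv]
  have hcast : (i : Int) + 1 = ((i + 1 : Nat) : Int) := by push_cast; ring
  rw [hcast, PySem.List.slice_to_natCast, PySem.List.slice_from_natCast]
  apply List.ext_getElem
  · simp; omega
  · intro j hj1 hj2
    simp only [List.getElem_map, List.getElem_range]
    rw [List.length_map, List.length_range] at hj1
    by_cases hji : j ≤ i
    · rw [List.getElem_append_left (by simp; omega)]
      rw [List.getElem_reverse, List.getElem_take]
      simp only [List.length_take]
      have : (xs.take (i + 1)).length = i + 1 := by simp; omega
      simp only [pvEmit, hji, if_pos]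
      rw [List.getD_eq_getElem xs "" (by omega)]
      congr 1
      omega
    · rw [List.getElem_append_right (by simp; omega)]
      rw [List.getElem_drop]
      simp only [pvEmit, hji, if_neg, not_false_iff]
      rw [List.getD_eq_getElem xs "" (by omega)]
      congr 1
      simp only [List.length_reverse, List.length_take]
      omega

lemma pv_index_lt {xs : List String} {v : String} {i : Nat}
    (h : PySem.List.index? xs v = some i) : i < xs.length := by
  obtain ⟨hk, _, _⟩ := PySem.List.getElem_of_index?_eq_some h
  exact hk

-- ===== VERDICT (by name: the statement is the Claim_ definition above) =====
theorem get_audio_names_sorted_spec : Claim_equal_get_audio_names_sorted := by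
  intro xs best _ _
  unfold Spec_get_audio_names_sorted get_audio_names_sorted get_audio_names_sorted_alt
  cases h1 : PySem.List.index? xs best with
  | some i => exact pvLoop_eq_mk xs i (pv_index_lt h1)
  | none =>
    cases h2 : PySem.List.index? xs "LEKTOR_PL" with
    | some i => exact pvLoop_eq_mk xs i (pv_index_lt h2)
    | none => rfl
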